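-- pv_equiv track=rewrite | github.com/deepammi/Multi-Agent-Custom-Automation-Engine-Solution-Accelerator | backend/app/agents/analysis_agent.py | _statuses_conflict
-- ===== SOURCE A (Python) =====
-- def _statuses_conflict(status1: str, status2: str) -> bool:
--     """Check if two payment statuses conflict."""
--     # Define conflicting status pairs
--     conflicts = [
--         ('paid', 'unpaid'),
--         ('paid', 'overdue'),
--         ('processed', 'pending'),
--         ('approved', 'rejected')
--     ]
--
--     status1_lower = status1.lower()
--     status2_lower = status2.lower()
--
--     for conflict_pair in conflicts:
--         if (status1_lower in conflict_pair and status2_lower in conflict_pair and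
--             status1_lower != status2_lower):
--             return True
--
--     return False
-- ===== SOURCE B (Python) =====
-- _CONFLICT_MAP = {
--     'paid': {'unpaid', 'overdue'},
--     'unpaid': {'paid'},
--     'overdue': {'paid'},
--     'processed': {'pending'},
--     'pending': {'processed'},
--     'approved': {'rejected'},
--     'rejected': {'approved'},
-- }
--
--
-- def _statuses_conflict(status1: str, status2: str) -> bool:
--     """Check if two payment statuses conflict."""
--     return status2.lower() in _CONFLICT_MAP.get(status1.lower(), set())
-- ===== Notes on version B (the rewrite author's own statement) =====
-- stated objective: idiomatic
-- what changed: Replaced the loop over conflict pairs (with two tuple-membership tests and an inequality per pair) by a precomputed symmetric adjacency dict from each lowercased status to the set of statuses it conflicts with, so the function body is a single dict lookup plus set membership with no loop.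
import Mathlib
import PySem

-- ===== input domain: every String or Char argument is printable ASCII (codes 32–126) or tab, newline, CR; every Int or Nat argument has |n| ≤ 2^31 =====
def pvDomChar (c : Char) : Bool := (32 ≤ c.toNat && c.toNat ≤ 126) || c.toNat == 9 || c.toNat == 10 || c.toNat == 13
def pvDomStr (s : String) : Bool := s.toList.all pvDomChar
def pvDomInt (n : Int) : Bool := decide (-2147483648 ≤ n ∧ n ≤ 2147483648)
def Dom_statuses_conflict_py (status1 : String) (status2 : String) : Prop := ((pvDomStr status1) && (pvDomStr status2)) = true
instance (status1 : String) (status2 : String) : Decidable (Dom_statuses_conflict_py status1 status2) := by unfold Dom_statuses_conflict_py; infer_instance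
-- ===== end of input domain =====

-- B replaces A's loop over conflict pairs by a precomputed symmetric adjacency map and one lookup (idiomatic; same cost class).

-- ===== PORT A =====
-- the literal list of conflicting pairs from A
def pvConflicts : List (String × String) :=
  [("paid", "unpaid"), ("paid", "overdue"), ("processed", "pending"), ("approved", "rejected")]

-- A's for-loop with early return True, else False after the list
def pvLoopA (l1 l2 : String) : List (String × String) → Bool
  | [] => false
  | p :: rest =>
      if ((l1 == p.1 || l1 == p.2) && (l2 == p.1 || l2 == p.2) && l1 != l2) then true
      else pvLoopA l1 l2 rest

def statuses_conflict_py (status1 : String) (status2 : String) : Bool :=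
  pvLoopA (PySem.Str.lower status1) (PySem.Str.lower status2) pvConflicts

-- ===== PORT B =====
-- the module-level adjacency dict: each lowercased status -> set of statuses it conflicts with
def pvConflictMap : PySem.Dict String (List String) :=
  PySem.Dict.mk
    [("paid", ["unpaid", "overdue"]),
     ("unpaid", ["paid"]),
     ("overdue", ["paid"]),
     ("processed", ["pending"]),
     ("pending", ["processed"]),
     ("approved", ["rejected"]),
     ("rejected", ["approved"])]

def statuses_conflict_py_alt (status1 : String) (status2 : String) : Bool :=
  (PySem.Dict.getD pvConflictMap (PySem.Str.lower status1) []).contains (PySem.Str.lower status2)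

-- ===== PRECONDITION & SPEC =====
def Spec_statuses_conflict_py (status1 : String) (status2 : String) (out : Bool) : Prop := out = statuses_conflict_py_alt status1 status2
instance (status1 : String) (status2 : String) (out : Bool) : Decidable (Spec_statuses_conflict_py status1 status2 out) := by unfold Spec_statuses_conflict_py; infer_instance

-- ===== CLAIM (what is proved, stated in full; the proofs are below) =====
def Claim_equal_statuses_conflict_py : Prop := ∀ (status1 : String) (status2 : String), Dom_statuses_conflict_py status1 status2 → Spec_statuses_conflict_py status1 status2 (statuses_conflict_py status1 status2)

-- ===== LEMMAS AND PROOFS =====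

-- core: for arbitrary (lowered) strings the pair-list scan equals the adjacency lookup
theorem pvCore (l1 l2 : String) :
    pvLoopA l1 l2 pvConflicts
      = (PySem.Dict.getD pvConflictMap l1 []).contains l2 := by
  by_cases h1 : l1 = "paid"
  · subst h1
    by_cases h2 : l2 = "unpaid" <;> by_cases h3 : l2 = "overdue" <;>
      simp_all [pvLoopA, pvConflicts, pvConflictMap, PySem.Dict.getD, PySem.Dict.get?]
  by_cases h1b : l1 = "unpaid"
  · subst h1b
    by_cases h2 : l2 = "paid" <;>
      simp_all [pvLoopA, pvConflicts, pvConflictMap, PySem.Dict.getD, PySem.Dict.get?]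
  by_cases h1c : l1 = "overdue"
  · subst h1c
    by_cases h2 : l2 = "paid" <;>
      simp_all [pvLoopA, pvConflicts, pvConflictMap, PySem.Dict.getD, PySem.Dict.get?]
  by_cases h1d : l1 = "processed"
  · subst h1d
    by_cases h2 : l2 = "pending" <;>
      simp_all [pvLoopA, pvConflicts, pvConflictMap, PySem.Dict.getD, PySem.Dict.get?]
  by_cases h1e : l1 = "pending"
  · subst h1e
    by_cases h2 : l2 = "processed" <;>
      simp_all [pvLoopA, pvConflicts, pvConflictMap, PySem.Dict.getD, PySem.Dict.get?]
  by_cases h1f : l1 = "approved"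
  · subst h1f
    by_cases h2 : l2 = "rejected" <;>
      simp_all [pvLoopA, pvConflicts, pvConflictMap, PySem.Dict.getD, PySem.Dict.get?]
  by_cases h1g : l1 = "rejected"
  · subst h1g
    by_cases h2 : l2 = "approved" <;>
      simp_all [pvLoopA, pvConflicts, pvConflictMap, PySem.Dict.getD, PySem.Dict.get?]
  -- l1 matches no key / no pair component
  have e1 : ("paid" == l1) = false := beq_eq_false_iff_ne.mpr (fun h => h1 h.symm)
  have e2 : ("unpaid" == l1) = false := beq_eq_false_iff_ne.mpr (fun h => h1b h.symm)
  have e3 : ("overdue" == l1) = false := beq_eq_false_iff_ne.mpr (fun h => h1c h.symm)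
  have e4 : ("processed" == l1) = false := beq_eq_false_iff_ne.mpr (fun h => h1d h.symm)
  have e5 : ("pending" == l1) = false := beq_eq_false_iff_ne.mpr (fun h => h1e h.symm)
  have e6 : ("approved" == l1) = false := beq_eq_false_iff_ne.mpr (fun h => h1f h.symm)
  have e7 : ("rejected" == l1) = false := beq_eq_false_iff_ne.mpr (fun h => h1g h.symm)
  simp [pvLoopA, pvConflicts, pvConflictMap, PySem.Dict.getD, PySem.Dict.get?, List.find?,
    h1, h1b, h1c, h1d, h1e, h1f, h1g, e1, e2, e3, e4, e5, e6, e7]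

-- ===== VERDICT (by name: the statement is the Claim_ definition above) =====
theorem statuses_conflict_py_spec : Claim_equal_statuses_conflict_py := by
  intro s1 s2 _
  unfold Spec_statuses_conflict_py statuses_conflict_py statuses_conflict_py_alt
  exact pvCore _ _
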